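-- pv_equiv track=rewrite | github.com/ssho90/hobot-service | hobot/service/graph/state/macro_state_generator.py | _split_node_ids
-- ===== SOURCE A (Python) =====
-- from typing import Any, Dict, Iterable, List, Optional
--
-- def _split_node_ids(node_ids: Iterable[str]) -> Dict[str, List[str]]:
--     buckets = {
--         "event_ids": [],
--         "indicator_codes": [],
--         "theme_ids": [],
--         "story_ids": [],
--         "doc_ids": [],
--     }
--     seen = {key: set() for key in buckets}
--
--     for node_id in node_ids:
--         raw = str(node_id or "").strip()
--         if ":" not in raw:
--             continue
--         prefix, value = raw.split(":", 1)
--         if not value: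
--             continue
--         if prefix == "event":
--             bucket_key = "event_ids"
--         elif prefix == "indicator":
--             bucket_key = "indicator_codes"
--         elif prefix == "theme":
--             bucket_key = "theme_ids"
--         elif prefix == "story":
--             bucket_key = "story_ids"
--         elif prefix == "document":
--             bucket_key = "doc_ids"
--         else:
--             continue
--
--         if value in seen[bucket_key]:
--             continue
--         seen[bucket_key].add(value)
--         buckets[bucket_key].append(value)
--
--     return buckets
-- ===== SOURCE B (Python) =====
-- def _split_node_ids(node_ids):
--     # Stage 1: one pass that parses ids into (prefix, value) tokens.
--     parsed = []
--     for node_id in node_ids: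
--         raw = str(node_id or "").strip()
--         if ":" not in raw:
--             continue
--         prefix, value = raw.split(":", 1)
--         if value:
--             parsed.append((prefix, value))
--
--     # Stage 2: each bucket is built independently by filtering the token
--     # stream for its prefix and deduping (first occurrence wins).
--     def bucket(prefix):
--         return list(dict.fromkeys(v for p, v in parsed if p == prefix))
--
--     return {
--         "event_ids": bucket("event"),
--         "indicator_codes": bucket("indicator"),
--         "theme_ids": bucket("theme"),
--         "story_ids": bucket("story"),
--         "doc_ids": bucket("document"),
--     }
-- ===== Notes on version B (the rewrite author's own statement) =====
-- stated objective: alternative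
-- what changed: Replaces A's single bucketing loop with five inline seen-sets by a two-stage pipeline: one pass parses ids into (prefix, value) tokens, then each of the five buckets is built independently by filtering the token list for its prefix and deduping via dict.fromkeys.
import Mathlib
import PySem

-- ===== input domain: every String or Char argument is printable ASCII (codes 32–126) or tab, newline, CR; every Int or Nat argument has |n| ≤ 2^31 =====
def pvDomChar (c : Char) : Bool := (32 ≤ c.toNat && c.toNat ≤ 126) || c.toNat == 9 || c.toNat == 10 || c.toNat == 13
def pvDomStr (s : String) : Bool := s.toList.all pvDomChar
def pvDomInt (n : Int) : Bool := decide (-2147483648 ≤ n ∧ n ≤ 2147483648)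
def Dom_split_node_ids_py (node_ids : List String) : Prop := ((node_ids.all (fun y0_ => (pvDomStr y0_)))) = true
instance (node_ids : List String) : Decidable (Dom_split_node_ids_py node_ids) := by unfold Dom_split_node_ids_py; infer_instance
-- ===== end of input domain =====

-- B replaces A's single bucketing loop (five inline seen-sets) by a two-stage
-- pipeline: one pass parses ids into (prefix, value) tokens, then each bucket is
-- built independently by filtering the token list and deduping; objective: alternative.

-- ===== PORT A =====
-- A's loop state: the five bucket lists plus the five `seen` sets.
structure PvStA where
  event_ids : List String
  indicator_codes : List String
  theme_ids : List String
  story_ids : List String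
  doc_ids : List String
  seen_event : PySem.Set String
  seen_indicator : PySem.Set String
  seen_theme : PySem.Set String
  seen_story : PySem.Set String
  seen_doc : PySem.Set String
deriving Repr, DecidableEq

def pvStepA (st : PvStA) (node_id : String) : PvStA :=
  let raw := PySem.Str.strip (if node_id == "" then "" else node_id)  -- str(node_id or "").strip()
  if PySem.Str.isIn ":" raw = false then st
  else
    match PySem.Str.splitMax? raw ":" 1 with
    | some (pfx :: value :: _) =>
      if value == "" then st
      else if pfx == "event" then
        if PySem.Set.contains st.seen_event value then st
        else { st with seen_event := PySem.Set.add st.seen_event value,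
                       event_ids := st.event_ids ++ [value] }
      else if pfx == "indicator" then
        if PySem.Set.contains st.seen_indicator value then st
        else { st with seen_indicator := PySem.Set.add st.seen_indicator value,
                       indicator_codes := st.indicator_codes ++ [value] }
      else if pfx == "theme" then
        if PySem.Set.contains st.seen_theme value then st
        else { st with seen_theme := PySem.Set.add st.seen_theme value,
                       theme_ids := st.theme_ids ++ [value] }
      else if pfx == "story" then
        if PySem.Set.contains st.seen_story value then st
        else { st with seen_story := PySem.Set.add st.seen_story value,
                       story_ids := st.story_ids ++ [value] }
      else if pfx == "document" then
        if PySem.Set.contains st.seen_doc value then st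
        else { st with seen_doc := PySem.Set.add st.seen_doc value,
                       doc_ids := st.doc_ids ++ [value] }
      else st
    | _ => st  -- unreachable: ":" ∈ raw guarantees exactly two pieces

def split_node_ids_py (node_ids : List String) : List (String × List String) :=
  let st := node_ids.foldl pvStepA ⟨[], [], [], [], [], [], [], [], [], []⟩
  [("event_ids", st.event_ids), ("indicator_codes", st.indicator_codes),
   ("theme_ids", st.theme_ids), ("story_ids", st.story_ids), ("doc_ids", st.doc_ids)]

-- ===== PORT B =====
-- stage 1 of Source B: parse one id into a (prefix, value) token, or skip it
def pvParse1 (node_id : String) : Option (String × String) :=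
  let raw := PySem.Str.strip (if node_id == "" then "" else node_id)  -- str(node_id or "").strip()
  if PySem.Str.isIn ":" raw = false then none
  else
    match PySem.Str.splitMax? raw ":" 1 with
    | some (pfx :: value :: _) => if value == "" then none else some (pfx, value)
    | _ => none  -- unreachable: ":" ∈ raw guarantees exactly two pieces

-- stage 2 of Source B: one bucket = filter the token list for its prefix, then dedup
def pvBucket (parsed : List (String × String)) (pfx : String) : List String :=
  PySem.List.dedup (parsed.filterMap (fun pv => if pv.1 == pfx then some pv.2 else none))

def split_node_ids_py_alt (node_ids : List String) : List (String × List String) :=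
  let parsed := node_ids.foldl
    (fun acc id => match pvParse1 id with
                   | some pv => acc ++ [pv]
                   | none => acc) []   -- the parse loop with `continue`s and append
  [("event_ids", pvBucket parsed "event"),
   ("indicator_codes", pvBucket parsed "indicator"),
   ("theme_ids", pvBucket parsed "theme"),
   ("story_ids", pvBucket parsed "story"),
   ("doc_ids", pvBucket parsed "document")]

-- ===== PRECONDITION & SPEC =====
def Spec_split_node_ids_py (node_ids : List String) (out : List (String × List String)) : Prop := out = split_node_ids_py_alt node_ids
instance (node_ids : List String) (out : List (String × List String)) : Decidable (Spec_split_node_ids_py node_ids out) := by unfold Spec_split_node_ids_py; infer_instance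

-- ===== CLAIM (what is proved, stated in full; the proofs are below) =====
def Claim_equal_split_node_ids_py : Prop := ∀ (node_ids : List String), Dom_split_node_ids_py node_ids → Spec_split_node_ids_py node_ids (split_node_ids_py node_ids)

-- ===== LEMMAS AND PROOFS =====

-- proof helper: which bucket a node id lands in, and the value appended
inductive PvBucketTag | ev | ind | th | st | doc
deriving DecidableEq, Repr

def pvPfx : PvBucketTag → String
  | .ev => "event" | .ind => "indicator" | .th => "theme" | .st => "story" | .doc => "document"

def pvClassify (node_id : String) : Option (PvBucketTag × String) :=
  let raw := PySem.Str.strip (if node_id == "" then "" else node_id)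
  if PySem.Str.isIn ":" raw = false then none
  else
    match PySem.Str.splitMax? raw ":" 1 with
    | some (pfx :: value :: _) =>
      if value == "" then none
      else if pfx == "event" then some (.ev, value)
      else if pfx == "indicator" then some (.ind, value)
      else if pfx == "theme" then some (.th, value)
      else if pfx == "story" then some (.st, value)
      else if pfx == "document" then some (.doc, value)
      else none
    | _ => none

-- the stream of values destined for bucket b
def pvVals (b : PvBucketTag) (ids : List String) : List String :=
  ids.filterMap (fun id =>
    match pvClassify id with
    | some (b', v) => if b' = b then some v else none
    | none => none)

lemma pvStepA_eq_classify (st : PvStA) (x : String) :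
    pvStepA st x =
      match pvClassify x with
      | none => st
      | some (.ev, v) => { st with seen_event := PySem.Set.add st.seen_event v,
                                   event_ids := if PySem.Set.contains st.seen_event v then st.event_ids else st.event_ids ++ [v] }
      | some (.ind, v) => { st with seen_indicator := PySem.Set.add st.seen_indicator v,
                                    indicator_codes := if PySem.Set.contains st.seen_indicator v then st.indicator_codes else st.indicator_codes ++ [v] }
      | some (.th, v) => { st with seen_theme := PySem.Set.add st.seen_theme v,
                                   theme_ids := if PySem.Set.contains st.seen_theme v then st.theme_ids else st.theme_ids ++ [v] }
      | some (.st, v) => { st with seen_story := PySem.Set.add st.seen_story v,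
                                   story_ids := if PySem.Set.contains st.seen_story v then st.story_ids else st.story_ids ++ [v] }
      | some (.doc, v) => { st with seen_doc := PySem.Set.add st.seen_doc v,
                                    doc_ids := if PySem.Set.contains st.seen_doc v then st.doc_ids else st.doc_ids ++ [v] } := by
  unfold pvStepA pvClassify
  by_cases h1 : PySem.Str.isIn ":" (PySem.Str.strip (if x == "" then "" else x)) = false
  · rw [if_pos h1, if_pos h1]
  · rw [if_neg h1, if_neg h1]
    rcases hs : PySem.Str.splitMax? (PySem.Str.strip (if x == "" then "" else x)) ":" 1 with _ | ⟨_ | ⟨p, _ | ⟨v, rest⟩⟩⟩ <;>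
      (simp only []; try rfl)
    split_ifs <;> simp_all [PySem.Set.add]

lemma pvLoopA_char (ids : List String) : ∀ (b1 b2 b3 b4 b5 : List String),
    ids.foldl pvStepA ⟨b1, b2, b3, b4, b5, b1, b2, b3, b4, b5⟩ =
      ⟨PySem.Set.update b1 (pvVals .ev ids), PySem.Set.update b2 (pvVals .ind ids),
       PySem.Set.update b3 (pvVals .th ids), PySem.Set.update b4 (pvVals .st ids),
       PySem.Set.update b5 (pvVals .doc ids),
       PySem.Set.update b1 (pvVals .ev ids), PySem.Set.update b2 (pvVals .ind ids),
       PySem.Set.update b3 (pvVals .th ids), PySem.Set.update b4 (pvVals .st ids),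
       PySem.Set.update b5 (pvVals .doc ids)⟩ := by
  induction ids with
  | nil => intro b1 b2 b3 b4 b5; simp [pvVals, PySem.Set.update]
  | cons x ids ih =>
    intro b1 b2 b3 b4 b5
    rw [List.foldl_cons, pvStepA_eq_classify]
    cases hc : pvClassify x with
    | none => rw [ih]; simp [pvVals, hc]
    | some bv =>
      obtain ⟨b, v⟩ := bv
      cases b <;>
        (dsimp only
         split_ifs with hmem <;>
           (simp only [PySem.Set.add, hmem, Bool.false_eq_true, if_true, if_false]
            rw [ih]
            simp only [PySem.Set.contains_iff] at hmem
            simp [pvVals, hc, PySem.Set.update, PySem.Set.add, hmem, List.foldl_cons]))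

-- B's parse loop is the filterMap of pvParse1
lemma pvParseLoop (ids : List String) : ∀ (acc : List (String × String)),
    ids.foldl (fun acc id => match pvParse1 id with
                             | some pv => acc ++ [pv]
                             | none => acc) acc = acc ++ ids.filterMap pvParse1 := by
  induction ids with
  | nil => intro acc; simp
  | cons x ids ih =>
    intro acc
    rw [List.foldl_cons]
    cases h : pvParse1 x <;> simp [h, ih]

-- the per-id token filtered to bucket b coincides with pvClassify filtered to b
lemma pvClassify_parse (b : PvBucketTag) (x : String) :
    (match pvClassify x with
     | some (b', v) => if b' = b then some v else none
     | none => none) =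
    (pvParse1 x).bind (fun pv => if pv.1 == pvPfx b then some pv.2 else none) := by
  unfold pvClassify pvParse1
  by_cases h1 : PySem.Str.isIn ":" (PySem.Str.strip (if x == "" then "" else x)) = false
  · rw [if_pos h1, if_pos h1]; rfl
  · rw [if_neg h1, if_neg h1]
    rcases hs : PySem.Str.splitMax? (PySem.Str.strip (if x == "" then "" else x)) ":" 1 with _ | ⟨_ | ⟨p, _ | ⟨v, rest⟩⟩⟩ <;>
      (simp only []; try rfl)
    cases b <;> (split_ifs <;> simp_all [pvPfx])

-- hence B's bucket filter applied to the parsed tokens is exactly pvVals b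
lemma pvFilter_parsed (b : PvBucketTag) (ids : List String) :
    (ids.filterMap pvParse1).filterMap
      (fun pv => if pv.1 == pvPfx b then some pv.2 else none) = pvVals b ids := by
  rw [List.filterMap_filterMap, pvVals]
  exact List.filterMap_congr (fun x _ => (pvClassify_parse b x).symm)

-- ===== VERDICT (by name: the statement is the Claim_ definition above) =====
theorem split_node_ids_py_spec : Claim_equal_split_node_ids_py := by
  intro ids _
  show split_node_ids_py ids = split_node_ids_py_alt ids
  simp only [split_node_ids_py, split_node_ids_py_alt, pvLoopA_char, pvParseLoop,
    List.nil_append, pvBucket]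
  have hb : ∀ b : PvBucketTag,
      PySem.List.dedup ((ids.filterMap pvParse1).filterMap
        (fun pv => if pv.1 == pvPfx b then some pv.2 else none)) =
      PySem.Set.update [] (pvVals b ids) := by
    intro b
    rw [pvFilter_parsed, PySem.Set.update_nil_left, PySem.List.dedup_eq_ofList]
  simp only [← hb]
  rfl
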